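-- pv_equiv track=rewrite | github.com/StarRealMan/VocaLyrics | build_database.py | chunk_lyrics
-- ===== SOURCE A (Python) =====
-- from typing import Any, Dict, List
--
-- def chunk_lyrics(
--     lyrics: str,
--     min_lines: int = 1
-- ) -> List[str]:
--     """
--     以空行分段，并保证每段至少 min_lines 行，不够则合并下一段。
--     """
--     raw_sections = [sec.strip() for sec in lyrics.split("\n\n") if sec.strip()]
--     sections = [sec.split("\n") for sec in raw_sections]
--
--     chunks = []
--     i = 0
--     n = len(sections)
--
--     while i < n:
--         lines = sections[i]
--         while len(lines) < min_lines and i + 1 < n: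
--             i += 1
--             lines += [""] + sections[i]
--
--         chunks.append("\n".join(lines))
--         i += 1
--
--     return chunks
-- ===== SOURCE B (Python) =====
-- from typing import List
--
-- def _bisect_ge(c, target, lo, hi):
--     # first index in [lo, hi) with c[idx] >= target, else hi (c increasing)
--     while lo < hi:
--         mid = (lo + hi) // 2
--         if c[mid] < target:
--             lo = mid + 1
--         else:
--             hi = mid
--     return lo
--
-- def chunk_lyrics(
--     lyrics: str,
--     min_lines: int = 1
-- ) -> List[str]:
--     """
--     以空行分段，并保证每段至少 min_lines 行，不够则合并下一段。
--     """
--     sections = [sec.strip().split("\n") for sec in lyrics.split("\n\n") if sec.strip()]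
--     n = len(sections)
--     # prefix table: c[k] = (total lines of sections[:k] merged with blank separators) + 1
--     c = [0]
--     for sec in sections:
--         c.append(c[-1] + len(sec) + 1)
--     chunks = []
--     start = 0
--     while start < n:
--         end = _bisect_ge(c, min_lines + c[start] + 1, start + 1, n)
--         chunks.append("\n\n".join("\n".join(sec) for sec in sections[start:end]))
--         start = end
--     return chunks
-- ===== Notes on version B (the rewrite author's own statement) =====
-- stated objective: alternative
-- what changed: Replaced A's nested while-loops (outer index walk with an inner lookahead that repeatedly concatenates line lists) by a precomputed prefix table of merged line counts plus a hand-written binary search that locates each chunk's cut point directly; each chunk is then built by double-joining a slice of sections instead of accumulating lines.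
import Mathlib
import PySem

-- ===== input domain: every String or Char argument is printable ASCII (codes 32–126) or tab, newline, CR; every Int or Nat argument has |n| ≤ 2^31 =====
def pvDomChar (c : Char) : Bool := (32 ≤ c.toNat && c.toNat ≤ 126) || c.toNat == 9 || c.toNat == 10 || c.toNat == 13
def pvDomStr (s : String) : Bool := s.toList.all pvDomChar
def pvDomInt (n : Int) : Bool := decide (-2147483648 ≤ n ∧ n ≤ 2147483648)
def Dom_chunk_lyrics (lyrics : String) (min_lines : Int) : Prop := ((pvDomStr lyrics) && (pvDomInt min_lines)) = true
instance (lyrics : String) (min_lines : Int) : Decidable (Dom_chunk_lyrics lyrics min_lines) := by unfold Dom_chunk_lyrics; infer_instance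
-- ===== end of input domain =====

-- B replaces A's nested while-loops (outer walk + inner merge-lookahead that concatenates
-- line lists) by a precomputed prefix table of merged line counts and a binary search that
-- finds each chunk's cut point directly; chunks are produced by joining a slice of sections
-- (objective: alternative). Return values only; neither program mutates caller-visible state.

-- Both Pythons build `sections` with the same line:
--   sections = [sec.strip().split("\n") for sec in lyrics.split("\n\n") if sec.strip()]
-- split? never returns none here: the separators "\n\n" and "\n" are non-empty literals.
def pvSectionsOf (lyrics : String) : List (List String) :=
  (((PySem.Str.split? lyrics "\n\n").getD []).filter
      (fun sec => PySem.Str.strip sec != "")).map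
    (fun sec => (PySem.Str.split? (PySem.Str.strip sec) "\n").getD [])

-- ===== PORT A =====
-- A's inner while: `while len(lines) < min_lines and i + 1 < n: i += 1; lines += [""] + sections[i]`
-- returns the final lines and the remaining sections after i.
def pvInnerA (min_lines : Int) (lines : List String) (rest : List (List String)) :
    List String × List (List String) :=
  if (lines.length : Int) < min_lines then
    match rest with
    | [] => (lines, [])
    | s :: r => pvInnerA min_lines (lines ++ [""] ++ s) r
  else (lines, rest)

-- termination helper for the outer loop: the inner while never lengthens the remainder
theorem pvInnerA_snd_le (min_lines : Int) (rest : List (List String)) :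
    ∀ lines, (pvInnerA min_lines lines rest).2.length ≤ rest.length := by
  induction rest with
  | nil => intro lines; rw [pvInnerA]; split <;> simp
  | cons s r ih =>
    intro lines; rw [pvInnerA]; split
    · exact le_trans (ih _) (by simp)
    · simp

-- A's outer while over i: take sections[i], run the inner while, append the joined chunk
def pvOuterA (min_lines : Int) (secs : List (List String)) : List String :=
  match secs with
  | [] => []
  | sec :: rest =>
    let p := pvInnerA min_lines sec rest
    PySem.Str.join "\n" p.1 :: pvOuterA min_lines p.2
termination_by secs.length
decreasing_by
  simp only [List.length_cons]
  exact Nat.lt_succ_of_le (pvInnerA_snd_le _ _ _)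

def chunk_lyrics (lyrics : String) (min_lines : Int) : List String :=
  pvOuterA min_lines (pvSectionsOf lyrics)

-- ===== PORT B =====
-- B's hand-written `_bisect_ge(c, target, lo, hi)`: first idx in [lo, hi) with c[idx] >= target,
-- else hi.  The while loop is transliterated with fuel hi - lo (each step shrinks the
-- interval, so the fuel never runs out while lo < hi).  `c[mid]` is always in range here
-- (mid < hi ≤ len(c)), so pyGetD is exact.
def pvBisectGeGo (c : List Int) (target : Int) : Nat → Nat → Nat → Nat
  | 0, lo, _ => lo
  | fuel + 1, lo, hi =>
    if lo < hi then
      if PySem.List.pyGetD c (((lo + hi) / 2 : Nat) : Int) 0 < target then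
        pvBisectGeGo c target fuel ((lo + hi) / 2 + 1) hi
      else pvBisectGeGo c target fuel lo ((lo + hi) / 2)
    else lo

def pvBisectGe (c : List Int) (target : Int) (lo hi : Nat) : Nat :=
  pvBisectGeGo c target (hi - lo) lo hi

-- B's `c = [0]; for sec in sections: c.append(c[-1] + len(sec) + 1)`
def pvBuildC (secs : List (List String)) : List Int :=
  secs.foldl
    (fun c sec => c ++ [PySem.List.pyGetD c (-1) 0 + PySem.List.len sec + 1])
    [(0 : Int)]

-- B's `while start < n:` loop, transliterated with fuel n - start (each iteration moves
-- start to e ≥ start + 1, so the fuel never runs out while start < n)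
def pvBuildBGo (secs : List (List String)) (c : List Int) (m : Int) (n : Nat) :
    Nat → Nat → List String
  | 0, _ => []
  | fuel + 1, start =>
    if start < n then
      -- e := _bisect_ge(c, min_lines + c[start] + 1, start + 1, n)
      PySem.Str.join "\n\n"
          ((PySem.List.slice secs (some (start : Int))
              (some ((pvBisectGe c (m + PySem.List.pyGetD c (start : Int) 0 + 1) (start + 1) n : Nat) : Int))).map
            (fun sec => PySem.Str.join "\n" sec))
        :: pvBuildBGo secs c m n fuel
            (pvBisectGe c (m + PySem.List.pyGetD c (start : Int) 0 + 1) (start + 1) n)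
    else []

def pvBuildB (secs : List (List String)) (c : List Int) (m : Int) (n start : Nat) :
    List String :=
  pvBuildBGo secs c m n (n - start) start

def chunk_lyrics_alt (lyrics : String) (min_lines : Int) : List String :=
  let sections := pvSectionsOf lyrics
  let n := sections.length
  let c := pvBuildC sections
  pvBuildB sections c min_lines n 0

-- ===== PRECONDITION & SPEC =====
def Spec_chunk_lyrics (lyrics : String) (min_lines : Int) (out : List String) : Prop := out = chunk_lyrics_alt lyrics min_lines
instance (lyrics : String) (min_lines : Int) (out : List String) : Decidable (Spec_chunk_lyrics lyrics min_lines out) := by unfold Spec_chunk_lyrics; infer_instance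

-- ===== CLAIM (what is proved, stated in full; the proofs are below) =====
def Claim_equal_chunk_lyrics : Prop := ∀ (lyrics : String) (min_lines : Int), Dom_chunk_lyrics lyrics min_lines → Spec_chunk_lyrics lyrics min_lines (chunk_lyrics lyrics min_lines)

-- ===== LEMMAS AND PROOFS =====

-- splitOn.go always terminates by pushing a final piece onto acc, so it is never empty
theorem pv_go_ne_nil (sep : List Char) :
    ∀ (fuel : Nat) (l cur : List Char) (acc : List (List Char)),
      PySem.Chars.splitOn.go sep fuel l cur acc ≠ [] := by
  intro fuel
  induction fuel with
  | zero => intro l cur acc; simp [PySem.Chars.splitOn.go]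
  | succ n ih =>
    intro l cur acc
    cases l with
    | nil => simp [PySem.Chars.splitOn.go]
    | cons c rest =>
      rw [PySem.Chars.splitOn.go]
      split
      · exact ih _ _ _
      · exact ih _ _ _

-- every element of `sections` comes from a str.split("\n") and is a non-empty list
theorem pv_sections_ne_nil (lyrics : String) :
    ∀ s ∈ pvSectionsOf lyrics, s ≠ [] := by
  intro s hs
  simp only [pvSectionsOf, List.mem_map] at hs
  obtain ⟨sec, -, rfl⟩ := hs
  simp only [PySem.Str.split?, PySem.Chars.split?]
  intro hcon
  have h1 : ("\n" : String).toList = ['\n'] := rfl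
  rw [h1] at hcon
  simp only [List.isEmpty_cons, if_false, Bool.false_eq_true] at hcon
  simp only [Option.map_some, Option.getD_some] at hcon
  exact pv_go_ne_nil _ _ _ _ _ (List.map_eq_nil_iff.mp hcon)

-- ---------- the inner while of A, characterised by its merge count tA ----------

-- number of extra sections A's inner while merges, given the current line count acc
def pvTA (m acc : Int) : List (List String) → Nat
  | [] => 0
  | s :: r => if acc < m then pvTA m (acc + s.length + 1) r + 1 else 0

theorem pvTA_le (m : Int) : ∀ (rest : List (List String)) (acc : Int),
    pvTA m acc rest ≤ rest.length := by
  intro rest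
  induction rest with
  | nil => intro acc; simp [pvTA]
  | cons s r ih =>
    intro acc
    simp only [pvTA]
    split
    · simpa using ih (acc + s.length + 1)
    · simp

theorem pvInnerA_eq (m : Int) : ∀ (rest : List (List String)) (lines : List String),
    pvInnerA m lines rest =
      (lines ++ (rest.take (pvTA m (lines.length : Int) rest)).flatMap (fun s => "" :: s),
       rest.drop (pvTA m (lines.length : Int) rest)) := by
  intro rest
  induction rest with
  | nil =>
    intro lines; rw [pvInnerA]; split <;> simp [pvTA]
  | cons s r ih =>
    intro lines
    rw [pvInnerA]
    split
    · rename_i hc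
      have hlen : ((lines ++ [""] ++ s).length : Int) = (lines.length : Int) + s.length + 1 := by
        simp
        omega
      rw [ih (lines ++ [""] ++ s), hlen]
      simp only [pvTA, if_pos hc]
      simp [List.flatMap_cons, List.append_assoc]
    · rename_i hc
      simp only [pvTA, if_neg hc]
      simp

-- ---------- B's prefix table c, characterised by pvCf ----------

-- pvCf a secs k = a + (lines of secs[:k] merged with blank separators) + k
def pvCf (a : Int) (secs : List (List String)) : Nat → Int
  | 0 => a
  | k + 1 =>
    match secs with
    | [] => a
    | s :: r => pvCf (a + s.length + 1) r k

def pvScan (a : Int) : List (List String) → List Int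
  | [] => [a]
  | s :: r => a :: pvScan (a + s.length + 1) r

theorem pvScan_length (a : Int) (secs : List (List String)) :
    (pvScan a secs).length = secs.length + 1 := by
  induction secs generalizing a with
  | nil => simp [pvScan]
  | cons s r ih => simp [pvScan, ih]

theorem pvBuildC_foldl (secs : List (List String)) :
    ∀ (c0 : List Int) (a : Int),
      secs.foldl
        (fun c sec => c ++ [PySem.List.pyGetD c (-1) 0 + PySem.List.len sec + 1])
        (c0 ++ [a]) = c0 ++ pvScan a secs := by
  induction secs with
  | nil => intro c0 a; simp [pvScan]
  | cons s r ih =>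
    intro c0 a
    rw [List.foldl_cons]
    have hstep : PySem.List.pyGetD (c0 ++ [a]) (-1) 0 + PySem.List.len s + 1 =
        a + (s.length : Int) + 1 := by
      simp [PySem.List.len_eq]
    rw [hstep, ih (c0 ++ [a]) (a + s.length + 1)]
    simp [pvScan]

theorem pvBuildC_eq (secs : List (List String)) : pvBuildC secs = pvScan 0 secs := by
  have := pvBuildC_foldl secs [] 0
  simpa [pvBuildC] using this

theorem pvScan_getD (secs : List (List String)) :
    ∀ (a : Int) (k : Nat), k ≤ secs.length → (pvScan a secs).getD k 0 = pvCf a secs k := by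
  induction secs with
  | nil =>
    intro a k hk
    have hk0 : k = 0 := by simpa using hk
    subst hk0
    simp [pvScan, pvCf]
  | cons s r ih =>
    intro a k hk
    cases k with
    | zero => simp [pvScan, pvCf]
    | succ k' => simpa [pvScan, pvCf] using ih (a + s.length + 1) k' (by simpa using hk)

theorem pvCf_ge (secs : List (List String)) : ∀ (a : Int) (k : Nat), a ≤ pvCf a secs k := by
  induction secs with
  | nil => intro a k; cases k <;> simp [pvCf]
  | cons s r ih =>
    intro a k
    cases k with
    | zero => simp [pvCf]
    | succ k' =>
      have := ih (a + s.length + 1) k'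
      simp only [pvCf]
      have h0 : (0 : Int) ≤ s.length := by positivity
      omega

theorem pvCf_lt (secs : List (List String)) :
    ∀ (a : Int) (i j : Nat), i < j → j ≤ secs.length → pvCf a secs i < pvCf a secs j := by
  induction secs with
  | nil => intro a i j hij hj; simp at hj; omega
  | cons s r ih =>
    intro a i j hij hj
    cases j with
    | zero => omega
    | succ j' =>
      cases i with
      | zero =>
        have h1 := pvCf_ge r (a + s.length + 1) j'
        have h0 : (0 : Int) ≤ s.length := by positivity
        simp only [pvCf]
        omega
      | succ i' =>
        simp only [pvCf]
        exact ih (a + s.length + 1) i' j' (by omega) (by simpa using hj)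

theorem pvCf_shift (secs : List (List String)) :
    ∀ (a b : Int) (k : Nat), pvCf (a + b) secs k = b + pvCf a secs k := by
  induction secs with
  | nil => intro a b k; cases k <;> simp [pvCf] <;> ring
  | cons s r ih =>
    intro a b k
    cases k with
    | zero => simp [pvCf]; ring
    | succ k' =>
      simp only [pvCf]
      rw [show a + b + (s.length : Int) + 1 = (a + s.length + 1) + b by ring,
        ih (a + s.length + 1) b k']

theorem pvCf_decomp (secs : List (List String)) :
    ∀ (i k : Nat) (a : Int), i + k ≤ secs.length →
      pvCf a secs (i + k) = pvCf (pvCf a secs i) (secs.drop i) k := by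
  induction secs with
  | nil =>
    intro i k a h
    simp only [List.length_nil, Nat.le_zero] at h
    have hi : i = 0 := by omega
    have hk : k = 0 := by omega
    subst hi; subst hk
    simp [pvCf]
  | cons s r ih =>
    intro i k a h
    cases i with
    | zero => simp [pvCf]
    | succ i' =>
      have : i' + 1 + k = (i' + k) + 1 := by omega
      rw [this]
      simp only [pvCf, List.drop_succ_cons]
      exact ih i' k (a + s.length + 1) (by simp at h; omega)

-- ---------- A's merge count hits the threshold exactly at the cut ----------

theorem pvTA_before (m : Int) : ∀ (rest : List (List String)) (acc : Int) (u : Nat),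
    u < pvTA m acc rest → pvCf acc rest u < m := by
  intro rest
  induction rest with
  | nil => intro acc u hu; simp [pvTA] at hu
  | cons s r ih =>
    intro acc u hu
    simp only [pvTA] at hu
    split at hu
    · cases u with
      | zero => simpa [pvCf] using ‹acc < m›
      | succ u' => exact ih (acc + s.length + 1) u' (by omega)
    · omega

theorem pvTA_at (m : Int) : ∀ (rest : List (List String)) (acc : Int),
    pvTA m acc rest < rest.length → m ≤ pvCf acc rest (pvTA m acc rest) := by
  intro rest
  induction rest with
  | nil => intro acc h; simp [pvTA] at h
  | cons s r ih =>
    intro acc h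
    by_cases hc : acc < m
    · simp only [pvTA, if_pos hc, List.length_cons] at h ⊢
      simp only [pvCf]
      exact ih (acc + s.length + 1) (by omega)
    · simp only [pvTA, if_neg hc] at h ⊢
      simp only [pvCf]
      omega

-- ---------- binary-search correctness on the (monotone) prefix table ----------

theorem pvBisectGeGo_lo_le (c : List Int) (t : Int) :
    ∀ fuel lo hi, lo ≤ pvBisectGeGo c t fuel lo hi := by
  intro fuel
  induction fuel with
  | zero => intro lo hi; simp [pvBisectGeGo]
  | succ k ih =>
    intro lo hi
    simp only [pvBisectGeGo]
    split
    · split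
      · exact le_trans (by omega) (ih ((lo + hi) / 2 + 1) hi)
      · exact ih lo ((lo + hi) / 2)
    · exact le_refl lo

theorem pvBisectGeGo_le_hi (c : List Int) (t : Int) :
    ∀ fuel lo hi, lo ≤ hi → pvBisectGeGo c t fuel lo hi ≤ hi := by
  intro fuel
  induction fuel with
  | zero => intro lo hi hle; simpa [pvBisectGeGo] using hle
  | succ k ih =>
    intro lo hi hle
    simp only [pvBisectGeGo]
    split
    · split
      · exact ih ((lo + hi) / 2 + 1) hi (by omega)
      · exact le_trans (ih lo ((lo + hi) / 2) (by omega)) (by omega)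
    · exact hle

theorem pvBisectGeGo_before (c : List Int) (t : Int)
    (mono : ∀ i j : Nat, i ≤ j → j < c.length → c.getD i 0 ≤ c.getD j 0) :
    ∀ fuel lo hi, hi ≤ c.length →
      ∀ i, lo ≤ i → i < pvBisectGeGo c t fuel lo hi → c.getD i 0 < t := by
  intro fuel
  induction fuel with
  | zero => intro lo hi hhi i hi1 hi2; simp [pvBisectGeGo] at hi2; omega
  | succ k ih =>
    intro lo hi hhi i hi1 hi2
    simp only [pvBisectGeGo] at hi2
    split at hi2
    · rename_i hn
      split at hi2
      · rename_i hmid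
        rw [PySem.List.pyGetD_natCast] at hmid
        by_cases hcase : i ≤ (lo + hi) / 2
        · calc c.getD i 0 ≤ c.getD ((lo + hi) / 2) 0 := mono i _ hcase (by omega)
            _ < t := hmid
        · exact ih ((lo + hi) / 2 + 1) hi hhi i (by omega) hi2
      · exact ih lo ((lo + hi) / 2) (by omega) i hi1 hi2
    · omega

theorem pvBisectGeGo_at (c : List Int) (t : Int) :
    ∀ fuel lo hi, hi - lo ≤ fuel →
      pvBisectGeGo c t fuel lo hi < hi → t ≤ c.getD (pvBisectGeGo c t fuel lo hi) 0 := by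
  intro fuel
  induction fuel with
  | zero => intro lo hi h hlt; simp [pvBisectGeGo] at hlt; omega
  | succ k ih =>
    intro lo hi h hlt
    simp only [pvBisectGeGo] at hlt ⊢
    split at hlt
    · rename_i hn
      rw [if_pos hn]
      split at hlt
      · rename_i hmid
        rw [if_pos hmid]
        exact ih ((lo + hi) / 2 + 1) hi (by omega) hlt
      · rename_i hmid
        rw [if_neg hmid]
        by_cases hend : pvBisectGeGo c t k lo ((lo + hi) / 2) < (lo + hi) / 2
        · exact ih lo ((lo + hi) / 2) (by omega) hend
        · have hle : pvBisectGeGo c t k lo ((lo + hi) / 2) ≤ (lo + hi) / 2 :=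
            pvBisectGeGo_le_hi c t k lo ((lo + hi) / 2) (by omega)
          have heq : pvBisectGeGo c t k lo ((lo + hi) / 2) = (lo + hi) / 2 := by omega
          rw [heq]
          rw [PySem.List.pyGetD_natCast] at hmid
          omega
    · omega

theorem pvBisectGe_lo_le (c : List Int) (t : Int) (lo hi : Nat) :
    lo ≤ pvBisectGe c t lo hi :=
  pvBisectGeGo_lo_le c t (hi - lo) lo hi

theorem pvBisectGe_le_hi (c : List Int) (t : Int) (lo hi : Nat) (hle : lo ≤ hi) :
    pvBisectGe c t lo hi ≤ hi :=
  pvBisectGeGo_le_hi c t (hi - lo) lo hi hle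

theorem pvBisectGe_before (c : List Int) (t : Int)
    (mono : ∀ i j : Nat, i ≤ j → j < c.length → c.getD i 0 ≤ c.getD j 0)
    (lo hi : Nat) (hhi : hi ≤ c.length) :
    ∀ i, lo ≤ i → i < pvBisectGe c t lo hi → c.getD i 0 < t :=
  pvBisectGeGo_before c t mono (hi - lo) lo hi hhi

theorem pvBisectGe_at (c : List Int) (t : Int) (lo hi : Nat) :
    pvBisectGe c t lo hi < hi → t ≤ c.getD (pvBisectGe c t lo hi) 0 :=
  pvBisectGeGo_at c t (hi - lo) lo hi (by omega)

-- two indices in [lo, n] that both fail strictly below themselves and succeed at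
-- themselves (unless = n) coincide
theorem pvUniq (f : Nat → Int) (t : Int) (lo n r1 r2 : Nat)
    (h1 : lo ≤ r1) (h1' : r1 ≤ n) (h2 : lo ≤ r2) (h2' : r2 ≤ n)
    (a1 : ∀ i, lo ≤ i → i < r1 → f i < t) (b1 : r1 < n → t ≤ f r1)
    (a2 : ∀ i, lo ≤ i → i < r2 → f i < t) (b2 : r2 < n → t ≤ f r2) : r1 = r2 := by
  by_contra hne
  rcases Nat.lt_or_ge r1 r2 with h | h
  · have := a2 r1 h1 h
    have := b1 (by omega)
    omega
  · have := a1 r2 h2 (by omega)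
    have := b2 (by omega)
    omega

-- ---------- the binary search finds exactly A's cut point ----------

theorem pvEndEq (secs : List (List String)) (m : Int) (start : Nat)
    (h : start < secs.length) :
    pvBisectGe (pvBuildC secs)
        (m + PySem.List.pyGetD (pvBuildC secs) (start : Int) 0 + 1) (start + 1) secs.length
      = start + 1 + pvTA m ((secs[start]'h).length : Int) (secs.drop (start + 1)) := by
  set n := secs.length with hn
  set L : Int := ((secs[start]'h).length : Int) with hL
  set rest := secs.drop (start + 1) with hrest
  have hrl : rest.length = n - (start + 1) := by simp [hrest, hn]
  have hClen : (pvBuildC secs).length = n + 1 := by rw [pvBuildC_eq]; simp [pvScan_length, hn]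
  have hCget : ∀ k : Nat, k ≤ n → (pvBuildC secs).getD k 0 = pvCf 0 secs k := by
    intro k hk; rw [pvBuildC_eq]; exact pvScan_getD secs 0 k hk
  -- c[start+1] = c[start] + L + 1
  have hdrop : secs.drop start = (secs[start]'h) :: rest := List.drop_eq_getElem_cons h
  have hsucc : pvCf 0 secs (start + 1) = pvCf 0 secs start + L + 1 := by
    have := pvCf_decomp secs start 1 0 (by omega)
    rw [this, hdrop]
    simp [pvCf, hL]
  -- c[start+1+u] translated through pvCf L rest u
  have hkey : ∀ u : Nat, u ≤ rest.length →
      (pvBuildC secs).getD (start + 1 + u) 0 = (pvCf 0 secs start + 1) + pvCf L rest u := by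
    intro u hu
    rw [hCget (start + 1 + u) (by omega)]
    rw [pvCf_decomp secs (start + 1) u 0 (by omega), hsucc, ← hrest]
    rw [show pvCf 0 secs start + L + 1 = L + (pvCf 0 secs start + 1) by ring]
    exact pvCf_shift rest L (pvCf 0 secs start + 1) u
  set t := m + PySem.List.pyGetD (pvBuildC secs) (start : Int) 0 + 1 with ht
  have hts : t = m + pvCf 0 secs start + 1 := by
    rw [ht, PySem.List.pyGetD_natCast, hCget start (by omega)]
  set ts := pvTA m L rest with hts2
  have htle : ts ≤ rest.length := pvTA_le m rest L
  have mono : ∀ i j : Nat, i ≤ j → j < (pvBuildC secs).length →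
      (pvBuildC secs).getD i 0 ≤ (pvBuildC secs).getD j 0 := by
    intro i j hij hjlen
    rcases Nat.eq_or_lt_of_le hij with rfl | hlt
    · exact le_refl _
    · rw [hCget i (by omega), hCget j (by omega)]
      exact le_of_lt (pvCf_lt secs 0 i j hlt (by omega))
  set e := pvBisectGe (pvBuildC secs) t (start + 1) n with he
  have he1 : start + 1 ≤ e := pvBisectGe_lo_le _ _ _ _
  have he2 : e ≤ n := pvBisectGe_le_hi _ _ _ _ (by omega)
  refine pvUniq (fun i => (pvBuildC secs).getD i 0) t (start + 1) n e (start + 1 + ts)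
    he1 he2 (by omega) (by omega)
    (fun i hi1 hi2 => pvBisectGe_before _ _ mono _ _ (by omega) i hi1 hi2)
    (fun hlt => pvBisectGe_at _ _ _ _ hlt)
    ?_ ?_
  · intro i hi1 hi2
    obtain ⟨u, rfl⟩ : ∃ u, i = start + 1 + u := ⟨i - (start + 1), by omega⟩
    have hu : u < ts := by omega
    show (pvBuildC secs).getD (start + 1 + u) 0 < t
    rw [hkey u (by omega), hts]
    have := pvTA_before m rest L u hu
    omega
  · intro hlt
    have hts' : ts < rest.length := by omega
    show t ≤ (pvBuildC secs).getD (start + 1 + ts) 0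
    rw [hkey ts (by omega), hts]
    have := pvTA_at m rest L hts'
    rw [← hts2] at this
    omega

-- ---------- joining a group of sections: "\n"-join with blank separators equals
-- ---------- "\n\n"-join of the per-section "\n"-joins ----------

theorem pvJoinAppend (sep : List Char) :
    ∀ (xs ys : List (List Char)), xs ≠ [] → ys ≠ [] →
      PySem.Chars.join sep (xs ++ ys) =
        PySem.Chars.join sep xs ++ sep ++ PySem.Chars.join sep ys := by
  intro xs
  induction xs with
  | nil => intro ys h; exact absurd rfl h
  | cons x xs ih =>
    intro ys _ hys
    cases xs with
    | nil =>
      cases ys with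
      | nil => exact absurd rfl hys
      | cons y ys' =>
        rw [List.singleton_append, PySem.Chars.join_cons_cons, PySem.Chars.join_singleton]
    | cons x2 xs' =>
      rw [show (x :: x2 :: xs') ++ ys = x :: x2 :: (xs' ++ ys) from rfl,
        PySem.Chars.join_cons_cons]
      rw [show x2 :: (xs' ++ ys) = (x2 :: xs') ++ ys from rfl, ih ys (by simp) hys]
      rw [PySem.Chars.join_cons_cons]
      simp [List.append_assoc]

theorem pvJoinChunkC :
    ∀ (gs : List (List (List Char))) (g : List (List Char)), g ≠ [] →
      (∀ h ∈ gs, h ≠ []) →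
      PySem.Chars.join ['\n'] (g ++ gs.flatMap (fun s => [] :: s)) =
        PySem.Chars.join ['\n', '\n'] ((g :: gs).map (PySem.Chars.join ['\n'])) := by
  intro gs
  induction gs with
  | nil =>
    intro g hg _
    simp [PySem.Chars.join_singleton]
  | cons h t ih =>
    intro g hg hmem
    have hh : h ≠ [] := hmem h (by simp)
    have ht : ∀ x ∈ t, x ≠ [] := fun x hx => hmem x (by simp [hx])
    have hflat : (h :: t).flatMap (fun s => ([] : List Char) :: s) =
        [] :: (h ++ t.flatMap (fun s => [] :: s)) := by simp
    rw [hflat]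
    have hrest : h ++ t.flatMap (fun s => ([] : List Char) :: s) ≠ [] := by
      cases h with
      | nil => exact absurd rfl hh
      | cons a b => simp
    rw [show g ++ [] :: (h ++ t.flatMap (fun s => ([] : List Char) :: s)) =
        g ++ ([[]] ++ (h ++ t.flatMap (fun s => [] :: s))) from by simp]
    rw [← List.append_assoc]
    rw [pvJoinAppend ['\n'] (g ++ [[]]) _ (by simp) hrest]
    rw [pvJoinAppend ['\n'] g [[]] hg (by simp)]
    rw [PySem.Chars.join_singleton]
    rw [ih h hh ht]
    simp [PySem.Chars.join_cons_cons, List.append_assoc]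

theorem pvJoinChunk (gs : List (List String)) (g : List String) (hg : g ≠ [])
    (hmem : ∀ h ∈ gs, h ≠ []) :
    PySem.Str.join "\n" (g ++ gs.flatMap (fun s => "" :: s)) =
      PySem.Str.join "\n\n" ((g :: gs).map (fun sec => PySem.Str.join "\n" sec)) := by
  apply String.toList_inj.mp
  rw [PySem.Str.toList_join, PySem.Str.toList_join]
  have h1 : ("\n" : String).toList = ['\n'] := rfl
  have h2 : ("\n\n" : String).toList = ['\n', '\n'] := rfl
  rw [h1, h2]
  have hmap1 : (g ++ gs.flatMap (fun s => "" :: s)).map String.toList =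
      g.map String.toList ++
        (gs.map (List.map String.toList)).flatMap (fun s => [] :: s) := by
    rw [List.map_append, List.map_flatMap, List.flatMap_map]
    congr 1
  have hmap2 : ((g :: gs).map (fun sec => PySem.Str.join "\n" sec)).map String.toList =
      ((g.map String.toList) :: gs.map (List.map String.toList)).map
        (PySem.Chars.join ['\n']) := by
    rw [show ((g.map String.toList) :: gs.map (List.map String.toList)) =
        (g :: gs).map (List.map String.toList) from rfl]
    rw [List.map_map, List.map_map]
    apply List.map_congr_left
    intro x hx
    simp [Function.comp, PySem.Str.toList_join, h1]
  rw [hmap1, hmap2]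
  exact pvJoinChunkC (gs.map (List.map String.toList)) (g.map String.toList)
    (by simpa using hg)
    (by intro x hx; simp only [List.mem_map] at hx; obtain ⟨y, hy, rfl⟩ := hx
        simpa using hmem y hy)

-- ---------- outer loops agree ----------

theorem pvOuterEq (secs : List (List String)) (hne : ∀ s ∈ secs, s ≠ []) (m : Int) :
    ∀ (fuel start : Nat), secs.length - start ≤ fuel →
      pvBuildBGo secs (pvBuildC secs) m secs.length fuel start =
        pvOuterA m (secs.drop start) := by
  intro fuel
  induction fuel with
  | zero =>
    intro start hf
    rw [pvBuildBGo, List.drop_eq_nil_of_le (by omega), pvOuterA]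
  | succ k ih =>
    intro start hf
    by_cases h : start < secs.length
    · rw [pvBuildBGo, if_pos h]
      have hdrop : secs.drop start = (secs[start]'h) :: secs.drop (start + 1) :=
        List.drop_eq_getElem_cons h
      rw [hdrop, pvOuterA]
      set rest := secs.drop (start + 1) with hrest
      set ts := pvTA m ((secs[start]'h).length : Int) rest with hts
      have hE := pvEndEq secs m start h
      rw [← hrest, ← hts] at hE
      have hInner := pvInnerA_eq m rest (secs[start]'h)
      rw [← hts] at hInner
      have htle : ts ≤ rest.length := pvTA_le m rest _
      have hrl : rest.length = secs.length - (start + 1) := by simp [hrest]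
      congr 1
      · -- the emitted chunk
        rw [hE]
        rw [PySem.List.slice_natCast]
        have : start + 1 + ts - start = ts + 1 := by omega
        rw [this, hdrop, List.take_succ_cons]
        rw [hInner]
        exact (pvJoinChunk (rest.take ts) (secs[start]'h)
          (hne _ (List.getElem_mem h))
          (fun x hx => hne x (List.mem_of_mem_drop (List.mem_of_mem_take hx)))).symm
      · -- the recursive tail
        rw [hE, hInner]
        have hdd : rest.drop ts = secs.drop (start + 1 + ts) := by
          rw [hrest, List.drop_drop]
        rw [hdd]
        exact ih (start + 1 + ts) (by omega)
    · rw [pvBuildBGo, if_neg h, List.drop_eq_nil_of_le (by omega), pvOuterA]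

-- ===== VERDICT (by name: the statement is the Claim_ definition above) =====
theorem chunk_lyrics_spec : Claim_equal_chunk_lyrics := by
  intro lyrics m _
  unfold Spec_chunk_lyrics chunk_lyrics chunk_lyrics_alt
  have := pvOuterEq (pvSectionsOf lyrics) (pv_sections_ne_nil lyrics) m
    ((pvSectionsOf lyrics).length - 0) 0 (by omega)
  simp only [List.drop_zero] at this
  exact this.symm
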